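-- pv_equiv track=rewrite | github.com/KawasakiHaruto712/review_priority | src/preprocessing/review_comment_processor.py | summarize_keywords_by_inclusion
-- ===== SOURCE A (Python) =====
-- def summarize_keywords_by_inclusion(keywords: list[str]) -> list[str]:
--     """
--     キーワードのリストから包含関係にある冗長なキーワードを削除し、より一般的な（短い）キーワードを優先する。
--
--     例: ['good', 'looks good', 'looks good to me'] -> ['good']
--     """
--     if not keywords:
--         return []
--
--     # 短いキーワードから順にソートする (昇順)
--     sorted_keywords = sorted(keywords, key=len, reverse=False)
--
--     # 最終的に残すキーワードのセット
--     kept_keywords_set = set()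
--
--     for current_keyword in sorted_keywords:
--         is_redundant = False
--         # 現在のキーワードが、既に保持された（より短い）キーワードを含んでいるかチェック
--         # もし current_keyword が kept_keyword を含むなら、current_keyword はより長く冗長なのでスキップ
--         for kept_keyword in kept_keywords_set:
--             if kept_keyword in current_keyword and current_keyword != kept_keyword:
--                 is_redundant = True
--                 break
--
--         if not is_redundant:
--             kept_keywords_set.add(current_keyword)
--
--     # アルファベット順にソートして返す
--     return sorted(list(kept_keywords_set))
-- ===== SOURCE B (Python) =====
-- def summarize_keywords_by_inclusion(keywords: list[str]) -> list[str]: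
--     # Index all keywords in a hash set, then keep exactly the keywords none of
--     # whose proper slices is itself a keyword (equivalent to A's length-sorted
--     # greedy).  Substring tests cost O(len(k)^2) hash lookups per keyword
--     # instead of a scan over the other keywords.
--     kwset = set(keywords)
--     result = []
--     for k in kwset:
--         n = len(k)
--         has_proper_sub = any(j - i < n and k[i:j] in kwset
--                              for i in range(n + 1) for j in range(i, n + 1))
--         if not has_proper_sub:
--             result.append(k)
--     return sorted(result)
-- ===== Notes on version B (the rewrite author's own statement) =====
-- stated objective: alternative
-- what changed: A sorts by length and runs a greedy loop testing each candidate against a growing kept set; B builds one hash set of all keywords and keeps exactly the keywords none of whose proper slices is itself a keyword, so the per-keyword cost is O(len^2) set lookups instead of a scan over kept keywords.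
import Mathlib
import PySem

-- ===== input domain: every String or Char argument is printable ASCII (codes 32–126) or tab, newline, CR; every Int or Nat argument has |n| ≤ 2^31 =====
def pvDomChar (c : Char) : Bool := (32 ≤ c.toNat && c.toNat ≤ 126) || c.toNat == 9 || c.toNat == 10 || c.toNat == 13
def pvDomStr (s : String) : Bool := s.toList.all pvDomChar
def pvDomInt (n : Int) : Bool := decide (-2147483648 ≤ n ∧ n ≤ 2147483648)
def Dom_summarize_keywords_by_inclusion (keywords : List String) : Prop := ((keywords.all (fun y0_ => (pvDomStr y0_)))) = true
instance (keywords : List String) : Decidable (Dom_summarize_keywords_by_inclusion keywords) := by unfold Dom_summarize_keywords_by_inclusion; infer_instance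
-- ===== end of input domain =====

-- B replaces A's length-sorted greedy (each candidate scanned against the growing kept set)
-- with a substring index: a hash set of all keywords, keeping exactly the keywords none of
-- whose proper slices is itself a keyword — objective: alternative algorithm, same result.

-- ===== PORT A =====
-- the body of A's inner loop (with its break, an 'any' over the kept set)
def pvStepA (s : PySem.Set String) (current_keyword : String) : PySem.Set String :=
  let is_redundant := s.any (fun kept_keyword =>
    PySem.Str.isIn kept_keyword current_keyword && current_keyword != kept_keyword)
  if is_redundant then s else PySem.Set.add s current_keyword

def summarize_keywords_by_inclusion (keywords : List String) : List String :=
  if keywords = [] then []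
  else
    let sorted_keywords := PySem.List.sorted keywords (fun k => PySem.Str.len k) false
    let kept_keywords_set : PySem.Set String := sorted_keywords.foldl pvStepA PySem.Set.empty
    PySem.List.sorted kept_keywords_set (fun x => x) false

-- ===== PORT B =====
-- has_proper_sub: some proper slice of k is itself a keyword
def pvHasProperSub (kwset : PySem.Set String) (k : String) : Bool :=
  let n := PySem.Str.len k
  (PySem.List.pyRange 0 (n + 1) 1).any (fun i =>
    (PySem.List.pyRange i (n + 1) 1).any (fun j =>
      decide (j - i < n) && PySem.Set.contains kwset (PySem.Str.slice k (some i) (some j))))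

def summarize_keywords_by_inclusion_alt (keywords : List String) : List String :=
  let kwset : PySem.Set String := PySem.Set.ofList keywords
  let result := kwset.foldl
    (fun acc k => if pvHasProperSub kwset k then acc else acc ++ [k]) []
  PySem.List.sorted result (fun x => x) false

-- ===== PRECONDITION & SPEC =====
def Spec_summarize_keywords_by_inclusion (keywords : List String) (out : List String) : Prop := out = summarize_keywords_by_inclusion_alt keywords
instance (keywords : List String) (out : List String) : Decidable (Spec_summarize_keywords_by_inclusion keywords out) := by unfold Spec_summarize_keywords_by_inclusion; infer_instance

-- ===== CLAIM (what is proved, stated in full; the proofs are below) =====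
def Claim_equal_summarize_keywords_by_inclusion : Prop := ∀ (keywords : List String), Dom_summarize_keywords_by_inclusion keywords → Spec_summarize_keywords_by_inclusion keywords (summarize_keywords_by_inclusion keywords)

-- ===== LEMMAS AND PROOFS =====

-- x is "minimal" in keywords: no other distinct keyword is a substring of it
def MinKw (keywords : List String) (x : String) : Prop :=
  ∀ o ∈ keywords, o ≠ x → ¬ (o.toList <:+: x.toList)

-- a proper slice of k is a keyword  ↔  some other distinct keyword is an infix of k
lemma hasProperSub_iff (keywords : List String) (k : String) :
    pvHasProperSub (PySem.Set.ofList keywords) k = true ↔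
      ∃ o ∈ keywords, o ≠ k ∧ o.toList <:+: k.toList := by
  simp only [pvHasProperSub, List.any_eq_true, PySem.List.mem_pyRange_one, Bool.and_eq_true,
    decide_eq_true_eq, PySem.Set.contains_iff, PySem.Set.mem_ofList, PySem.Str.len_eq]
  constructor
  · rintro ⟨i, ⟨hi0, hin⟩, j, ⟨hij, hjn⟩, hlt, hmem⟩
    have hj0 : 0 ≤ j := le_trans hi0 hij
    have hto : (PySem.Str.slice k (some i) (some j)).toList
        = List.take (j.toNat - i.toNat) (List.drop i.toNat k.toList) := by
      rw [PySem.Str.toList_slice, PySem.Chars.slice_eq_listSlice,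
        PySem.List.slice_toNat k.toList hi0 hj0]
    have hlenlt : (PySem.Str.slice k (some i) (some j)).toList.length < k.toList.length := by
      rw [hto]
      simp only [List.length_take, List.length_drop]
      omega
    refine ⟨_, hmem, ?_, ?_⟩
    · -- the slice is strictly shorter than k, hence ≠ k
      intro h
      rw [h] at hlenlt
      omega
    · -- the slice is an infix of k
      rw [hto]
      exact (List.take_prefix _ _).isInfix.trans (List.drop_suffix _ _).isInfix
  · rintro ⟨o, ho, hne, hinf⟩
    obtain ⟨pre, suf, hps⟩ := hinf
    have hlen : pre.length + (o.toList.length + suf.length) = k.toList.length := by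
      have := congrArg List.length hps
      simpa using this
    have hNlt : o.toList.length < k.toList.length := by
      rcases Nat.lt_or_ge o.toList.length k.toList.length with h | h
      · exact h
      · exfalso
        have h0 : pre.length = 0 ∧ suf.length = 0 := by omega
        have : o.toList = k.toList := by
          rw [← hps, List.length_eq_zero_iff.mp h0.1, List.length_eq_zero_iff.mp h0.2]
          simp
        exact hne (String.toList_inj.mp this)
    refine ⟨(pre.length : Int), ⟨by positivity, by omega⟩,
            (pre.length : Int) + (o.toList.length : Int), ⟨by omega, by omega⟩, by omega, ?_⟩
    have hslice : PySem.Str.slice k (some (pre.length : Int))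
        (some ((pre.length : Int) + (o.toList.length : Int))) = o := by
      apply String.toList_inj.mp
      rw [PySem.Str.toList_slice, PySem.Chars.slice_eq_listSlice,
        PySem.List.slice_natCast_add, ← hps, List.append_assoc, List.drop_left,
        List.take_left]
    rw [hslice]
    exact ho

-- the filtering loop of B: append-if-kept over the keyword set is a filter
lemma foldl_keep_not (p : String → Bool) (l acc : List String) :
    l.foldl (fun acc k => if p k then acc else acc ++ [k]) acc
      = acc ++ l.filter (fun k => !p k) := by
  induction l generalizing acc with
  | nil => simp
  | cons h t ih => by_cases hp : p h <;> simp [hp, ih]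

-- every keyword contains a minimal keyword as a substring
lemma exists_minkw (keywords : List String) :
    ∀ n (o : String), o ∈ keywords → o.toList.length ≤ n →
      ∃ m ∈ keywords, m.toList <:+: o.toList ∧ MinKw keywords m := by
  intro n
  induction n with
  | zero =>
    intro o ho hlen
    by_cases h : MinKw keywords o
    · exact ⟨o, ho, List.infix_refl _, h⟩
    · simp only [MinKw, not_forall] at h
      obtain ⟨o', ho', hne, hinf⟩ := h
      rw [not_not] at hinf
      have := hinf.sublist.length_le
      have : o'.toList.length = 0 := by omega
      have : o'.toList = o.toList := hinf.sublist.eq_of_length (by omega)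
      exact absurd (String.toList_inj.mp this) hne
  | succ n ih =>
    intro o ho hlen
    by_cases h : MinKw keywords o
    · exact ⟨o, ho, List.infix_refl _, h⟩
    · simp only [MinKw, not_forall] at h
      obtain ⟨o', ho', hne, hinf⟩ := h
      rw [not_not] at hinf
      have hle := hinf.sublist.length_le
      have hlt : o'.toList.length < o.toList.length := by
        rcases lt_or_eq_of_le hle with h' | h'
        · exact h'
        · exact absurd (String.toList_inj.mp (hinf.sublist.eq_of_length h')) hne
      obtain ⟨m, hm, hminf, hmin⟩ := ih o' ho' (by omega)
      exact ⟨m, hm, hminf.trans hinf, hmin⟩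

lemma redundant_iff (s : PySem.Set String) (c : String) :
    (s.any (fun kept => PySem.Str.isIn kept c && c != kept)) = true ↔
      ∃ kept ∈ s, kept.toList <:+: c.toList ∧ kept ≠ c := by
  simp [PySem.Chars.isIn_iff_infix]
  exact ⟨fun ⟨k, hk, hi, hne⟩ => ⟨k, hk, hi, fun h => hne h.symm⟩,
         fun ⟨k, hk, hi, hne⟩ => ⟨k, hk, hi, fun h => hne h.symm⟩⟩

-- the loop invariant of A's greedy over the length-sorted list
lemma foldl_inv (keywords L : List String)
    (hperm : L.Perm keywords)
    (hsort : L.Pairwise (fun a b => a.toList.length ≤ b.toList.length)) :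
    ∀ (P R : List String), L = P ++ R →
      (P.foldl pvStepA PySem.Set.empty).Nodup ∧
      (∀ x, x ∈ P.foldl pvStepA PySem.Set.empty ↔ (x ∈ P ∧ MinKw keywords x)) := by
  intro P
  induction P using List.reverseRecOn with
  | nil => intro R _; exact ⟨List.nodup_nil, by simp [PySem.Set.empty]⟩
  | append_singleton P' c ih =>
    intro R hL
    have hL' : L = P' ++ (c :: R) := by simpa using hL
    obtain ⟨hnodup, hmem⟩ := ih (c :: R) hL'
    set S := P'.foldl pvStepA PySem.Set.empty with hS
    have hfold : (P' ++ [c]).foldl pvStepA PySem.Set.empty = pvStepA S c := by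
      simp [List.foldl_append, hS]
    -- elements after c in L (including c) are at least as long as c
    have hlong : ∀ y ∈ keywords, y.toList.length < c.toList.length → y ∈ P' := by
      intro y hy hylen
      have hyL : y ∈ L := hperm.symm.subset hy
      rw [hL'] at hyL
      rcases List.mem_append.mp hyL with h | h
      · exact h
      · exfalso
        rcases List.mem_cons.mp h with rfl | h
        · omega
        · have hp : (c :: R).Pairwise (fun a b => a.toList.length ≤ b.toList.length) :=
            hsort.sublist (by rw [hL']; exact (List.sublist_append_right _ _))
          have := (List.pairwise_cons.mp hp).1 y h
          omega
    by_cases hred : (S.any (fun kept => PySem.Str.isIn kept c && c != kept)) = true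
    · -- c is redundant: some kept (hence minimal) keyword is a proper substring
      obtain ⟨k, hk, hki, hkne⟩ := (redundant_iff S c).mp hred
      have hkP := (hmem k).mp hk
      have hcnotmin : ¬ MinKw keywords c := by
        intro hmin
        exact hmin k (hperm.subset (by rw [hL']; exact List.mem_append_left _ hkP.1)) hkne hki
      have hstep : pvStepA S c = S := by simp only [pvStepA]; rw [if_pos hred]
      rw [hfold, hstep]
      refine ⟨hnodup, fun x => ?_⟩
      rw [hmem x]
      constructor
      · rintro ⟨hx, hm⟩; exact ⟨List.mem_append_left _ hx, hm⟩
      · rintro ⟨hx, hm⟩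
        rcases List.mem_append.mp hx with h | h
        · exact ⟨h, hm⟩
        · simp at h; subst h; exact absurd hm hcnotmin
    · -- c is not redundant: c is minimal
      have hcL : c ∈ keywords := hperm.subset (by rw [hL']; simp)
      have hcmin : MinKw keywords c := by
        intro o ho hone hoinf
        apply hred
        rw [redundant_iff]
        have hole := hoinf.sublist.length_le
        have holt : o.toList.length < c.toList.length := by
          rcases lt_or_eq_of_le hole with h' | h'
          · exact h'
          · exact absurd (String.toList_inj.mp (hoinf.sublist.eq_of_length h')) hone
        obtain ⟨m, hm, hmi, hmmin⟩ := exists_minkw keywords o.toList.length o ho le_rfl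
        have hmlen : m.toList.length ≤ o.toList.length := hmi.sublist.length_le
        have hmP : m ∈ P' := hlong m hm (by omega)
        have hmc : m ≠ c := by
          intro h; subst h
          omega
        exact ⟨m, (hmem m).mpr ⟨hmP, hmmin⟩, hmi.trans hoinf, hmc⟩
      have hstep : pvStepA S c = PySem.Set.add S c := by
        simp only [pvStepA]; rw [if_neg hred]
      rw [hfold, hstep]
      constructor
      · exact PySem.Set.nodup_add S c hnodup
      · intro x
        rw [PySem.Set.mem_add, hmem x]
        constructor
        · rintro (⟨hx, hm⟩ | rfl)
          · exact ⟨List.mem_append_left _ hx, hm⟩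
          · exact ⟨by simp, hcmin⟩
        · rintro ⟨hx, hm⟩
          rcases List.mem_append.mp hx with h | h
          · exact Or.inl ⟨h, hm⟩
          · simp at h; subst h; exact Or.inr rfl

-- ===== VERDICT (by name: the statement is the Claim_ definition above) =====
theorem summarize_keywords_by_inclusion_spec : Claim_equal_summarize_keywords_by_inclusion := by
  intro keywords _
  unfold Spec_summarize_keywords_by_inclusion
  by_cases hnil : keywords = []
  · subst hnil; rfl
  · simp only [summarize_keywords_by_inclusion, summarize_keywords_by_inclusion_alt,
      if_neg hnil]
    set L := PySem.List.sorted keywords (fun k => PySem.Str.len k) false with hLdef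
    have hperm : L.Perm keywords := PySem.List.sorted_perm _ _ _
    have hsort : L.Pairwise (fun a b => a.toList.length ≤ b.toList.length) := by
      have := PySem.List.sorted_pairwise keywords (fun k => PySem.Str.len k)
      refine this.imp ?_
      intro a b h
      simpa [PySem.Str.len_eq] using h
    obtain ⟨hnodup, hmem⟩ := foldl_inv keywords L hperm hsort L [] (by simp)
    rw [foldl_keep_not]
    apply PySem.List.sorted_eq_sorted_of_perm _ _ _ (fun a b h => h)
    have hnodupB : (List.filter (fun k => !pvHasProperSub (PySem.Set.ofList keywords) k)
        (PySem.Set.ofList keywords)).Nodup := (PySem.Set.nodup_ofList keywords).filter _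
    rw [List.perm_ext_iff_of_nodup hnodup (by simpa using hnodupB)]
    intro x
    rw [hmem x]
    simp only [List.nil_append, List.mem_filter, PySem.Set.mem_ofList, Bool.not_eq_true',
      ← Bool.not_eq_true (pvHasProperSub _ x), hasProperSub_iff]
    constructor
    · rintro ⟨hx, hm⟩
      refine ⟨hperm.subset hx, ?_⟩
      rintro ⟨o, ho, hone, hoinf⟩
      exact hm o ho hone hoinf
    · rintro ⟨hx, hm⟩
      refine ⟨hperm.symm.subset hx, ?_⟩
      intro o ho hone hoinf
      exact hm ⟨o, ho, hone, hoinf⟩
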